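-- pv_equiv track=rewrite | github.com/Clover-Hill/Serverless-Computing | split_strategy.py | naive_split
-- ===== SOURCE A (Python) =====
-- from typing import List, Tuple, Any
-- from collections import defaultdict
--
-- def naive_split(contents: List[Tuple[Any, int]], num_splits: int) -> List[List[Tuple[Any, int]]]:
--     """Simple round-robin distribution of same-key groups"""
--     # Group by key
--     key_groups = defaultdict(list)
--     for item in contents:
--         key_groups[item[0]].append(item)
--
--     # Initialize splits
--     splits = [[] for _ in range(num_splits)]
--
--     # Distribute groups to minimize size difference
--     current_sizes = [0] * num_splits
--
--     for key, group in key_groups.items():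
--         # Find split with minimum current size
--         min_split = current_sizes.index(min(current_sizes))
--         splits[min_split].extend(group)
--         current_sizes[min_split] += len(group)
--
--     return splits
-- ===== SOURCE B (Python) =====
-- def naive_split(contents, num_splits):
--     """Distribute same-key groups via a sorted queue of (size, index) instead of rescanning sizes each step."""
--     key_groups = {}
--     for item in contents:
--         key_groups.setdefault(item[0], []).append(item)
--     splits = [[] for _ in range(num_splits)]
--     queue = [(0, i) for i in range(num_splits)]  # always sorted ascending
--     for group in key_groups.values():
--         size, i = queue.pop(0)
--         splits[i] += group
--         entry = (size + len(group), i)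
--         lo = 0
--         while lo < len(queue) and queue[lo] < entry:
--             lo += 1
--         queue.insert(lo, entry)
--     return splits
-- ===== Notes on version B (the rewrite author's own statement) =====
-- stated objective: alternative
-- what changed: B replaces A's per-group double rescan of current_sizes (min() then .index()) by a priority queue: a list of (size, index) pairs kept sorted ascending, popping the head and reinserting the updated pair at its sorted position.
import Mathlib
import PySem

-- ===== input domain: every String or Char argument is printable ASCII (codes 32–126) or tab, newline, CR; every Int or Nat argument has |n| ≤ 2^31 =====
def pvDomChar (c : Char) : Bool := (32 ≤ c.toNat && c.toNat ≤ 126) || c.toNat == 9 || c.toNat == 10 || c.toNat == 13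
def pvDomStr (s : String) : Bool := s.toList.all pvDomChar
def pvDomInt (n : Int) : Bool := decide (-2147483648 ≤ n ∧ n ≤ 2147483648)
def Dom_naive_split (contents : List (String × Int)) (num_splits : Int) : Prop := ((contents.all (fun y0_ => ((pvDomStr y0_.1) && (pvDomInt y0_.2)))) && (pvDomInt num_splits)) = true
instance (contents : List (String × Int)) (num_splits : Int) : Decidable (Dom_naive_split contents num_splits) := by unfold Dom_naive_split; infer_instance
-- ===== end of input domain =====

-- B replaces A's per-group rescans of current_sizes (min, then .index) by a queue of (size, index)
-- pairs kept sorted ascending, popping its head; objective: alternative algorithm, same asymptotic cost.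

-- ===== PORT A =====
def naive_split (contents : List (String × Int)) (num_splits : Int) : List (List (String × Int)) :=
  let key_groups : PySem.Dict String (List (String × Int)) :=
    contents.foldl (fun d item => d.modify item.1 [] (· ++ [item])) PySem.Dict.empty
  let splits : List (List (String × Int)) := (PySem.List.pyRange 0 num_splits 1).map (fun _ => [])
  let current_sizes : List Int := PySem.List.pyRepeat [(0 : Int)] num_splits
  let st := key_groups.items.foldl (fun st kg =>
      match PySem.List.min? st.2 (fun x => x) with
      | none => st          -- Python: min([]) raises ValueError; excluded by Pre_
      | some m =>
        match PySem.List.index? st.2 m with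
        | none => st        -- unreachable: m ∈ st.2
        | some j => (st.1.modify j (· ++ kg.2), st.2.modify j (· + (kg.2.length : Int))))
    (splits, current_sizes)
  st.1

-- ===== PORT B =====
-- Python tuple comparison (size, index) < (size, index)
def pvLtPair (a b : Int × Int) : Bool := a.1 < b.1 || (a.1 == b.1 && a.2 < b.2)

-- the 'while lo < len(queue) and queue[lo] < entry: lo += 1' scan
def pvInsPos : List (Int × Int) → (Int × Int) → Nat
  | [], _ => 0
  | x :: t, e => if pvLtPair x e then pvInsPos t e + 1 else 0

def naive_split_alt (contents : List (String × Int)) (num_splits : Int) : List (List (String × Int)) :=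
  let key_groups : PySem.Dict String (List (String × Int)) :=
    contents.foldl (fun d item => d.modify item.1 [] (· ++ [item])) PySem.Dict.empty
  let splits : List (List (String × Int)) := (PySem.List.pyRange 0 num_splits 1).map (fun _ => [])
  let queue : List (Int × Int) := (PySem.List.pyRange 0 num_splits 1).map (fun i => ((0 : Int), i))
  let st := key_groups.values.foldl (fun st group =>
      match PySem.List.pop? st.2 0 with
      | none => st          -- Python: pop from empty list raises IndexError; excluded by Pre_
      | some (si, rest) =>
        let entry : Int × Int := (si.1 + (group.length : Int), si.2)
        -- si.2 is an index produced by range(num_splits), hence ≥ 0: .toNat indexing is exact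
        (st.1.modify si.2.toNat (· ++ group),
         PySem.List.insert rest ((pvInsPos rest entry : Nat) : Int) entry))
    (splits, queue)
  st.1

-- ===== PRECONDITION & SPEC =====
-- Pre_ excludes only the inputs where A raises: num_splits < 1 with nonempty contents
-- (min() of the empty current_sizes raises ValueError there; B's queue.pop(0) raises too).
def Pre_naive_split (contents : List (String × Int)) (num_splits : Int) : Prop :=
  contents = [] ∨ 1 ≤ num_splits
instance (contents : List (String × Int)) (num_splits : Int) : Decidable (Pre_naive_split contents num_splits) := by unfold Pre_naive_split; infer_instance

def pvWitness_naive_split : (List (String × Int)) × Int := ([("a", 1), ("b", 2), ("a", 3)], 2)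

def Spec_naive_split (contents : List (String × Int)) (num_splits : Int) (out : List (List (String × Int))) : Prop := out = naive_split_alt contents num_splits
instance (contents : List (String × Int)) (num_splits : Int) (out : List (List (String × Int))) : Decidable (Spec_naive_split contents num_splits out) := by unfold Spec_naive_split; infer_instance

-- ===== CLAIM (what is proved, stated in full; the proofs are below) =====
def Claim_equal_naive_split : Prop := ∀ (contents : List (String × Int)) (num_splits : Int), Dom_naive_split contents num_splits → Pre_naive_split contents num_splits → Spec_naive_split contents num_splits (naive_split contents num_splits)

-- ===== LEMMAS AND PROOFS =====

def pvLex (a b : Int × Int) : Prop := a.1 < b.1 ∨ (a.1 = b.1 ∧ a.2 < b.2)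
theorem pvLtPair_iff (a b : Int × Int) : pvLtPair a b = true ↔ pvLex a b := by
  simp [pvLtPair, pvLex]
def pvPairs (sizes : List Int) (s : Nat) : List (Int × Int) :=
  (sizes.zipIdx s).map (fun p => (p.1, (p.2 : Int)))
theorem pvPairs_cons (x : Int) (t : List Int) (s : Nat) :
    pvPairs (x :: t) s = (x, (s : Int)) :: pvPairs t (s + 1) := by
  simp [pvPairs, List.zipIdx_cons]

theorem pvPairs_append (l1 l2 : List Int) (s : Nat) :
    pvPairs (l1 ++ l2) s = pvPairs l1 s ++ pvPairs l2 (s + l1.length) := by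
  simp [pvPairs, List.zipIdx_append]

theorem pvLex_trans {a b c : Int × Int} (h1 : pvLex a b) (h2 : pvLex b c) : pvLex a c := by
  unfold pvLex at *; omega

theorem pvLex_total {a b : Int × Int} (h : pvLtPair a b = false) (hne : a.2 ≠ b.2) : pvLex b a := by
  simp [pvLtPair] at h; unfold pvLex; omega

theorem pvLex_asymm {a b : Int × Int} (h1 : pvLex a b) (h2 : pvLex b a) : False := by
  unfold pvLex at *; omega

theorem mem_pvPairs (l : List Int) (s : Nat) (p : Int × Int) :
    p ∈ pvPairs l s ↔ ∃ (k : Nat), ∃ (_ : k < l.length), p = (l[k], ((s + k : Nat) : Int)) := by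
  induction l generalizing s with
  | nil => simp [pvPairs]
  | cons x t ih =>
    rw [pvPairs_cons]
    simp only [List.mem_cons, ih]
    constructor
    · rintro (h | ⟨k, hk, rfl⟩)
      · exact ⟨0, by simp, by simpa using h⟩
      · refine ⟨k + 1, by simpa using Nat.succ_lt_succ hk, ?_⟩
        simp only [List.getElem_cons_succ]
        congr 2
        omega
    · rintro ⟨k, hk, rfl⟩
      cases k with
      | zero => left; simp
      | succ k =>
        right
        refine ⟨k, by simpa using Nat.lt_of_succ_lt_succ hk, ?_⟩
        simp only [List.getElem_cons_succ]
        congr 2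
        omega

theorem pvPairs_snd_ge {l : List Int} {s : Nat} {y : Int × Int} (h : y ∈ pvPairs l s) :
    (s : Int) ≤ y.2 := by
  rw [mem_pvPairs] at h
  obtain ⟨k, hk, rfl⟩ := h
  simp

theorem pvPairs_snd_nodup (l : List Int) (s : Nat) : ((pvPairs l s).map (·.2)).Nodup := by
  induction l generalizing s with
  | nil => simp [pvPairs]
  | cons x t ih =>
    rw [pvPairs_cons]
    simp only [List.map_cons, List.nodup_cons]
    refine ⟨?_, ih (s+1)⟩
    intro hmem
    simp only [List.mem_map] at hmem
    obtain ⟨y, hy, h2⟩ := hmem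
    have := pvPairs_snd_ge hy
    omega

theorem pvInsPos_le (q : List (Int × Int)) (e : Int × Int) : pvInsPos q e ≤ q.length := by
  induction q with
  | nil => simp [pvInsPos]
  | cons x t ih =>
    simp only [pvInsPos]
    split
    · simpa using ih
    · simp

def pvInsSorted : List (Int × Int) → (Int × Int) → List (Int × Int)
  | [], e => [e]
  | x :: t, e => if pvLtPair x e then x :: pvInsSorted t e else e :: x :: t

theorem insert_eq_pvInsSorted (q : List (Int × Int)) (e : Int × Int) :
    PySem.List.insert q ((pvInsPos q e : Nat) : Int) e = pvInsSorted q e := by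
  induction q with
  | nil => simp [pvInsPos, pvInsSorted, PySem.List.insert_zero]
  | cons x t ih =>
    simp only [pvInsPos, pvInsSorted]
    split
    · rw [PySem.List.insert_natCast _ _ _ (by simpa using Nat.succ_le_succ (pvInsPos_le t e))]
      rw [PySem.List.insert_natCast _ _ _ (pvInsPos_le t e)] at ih
      simp [List.take_succ_cons, List.drop_succ_cons, ← ih]
    · simpa using PySem.List.insert_zero (x :: t) e

theorem pvInsSorted_perm (q : List (Int × Int)) (e : Int × Int) :
    (pvInsSorted q e).Perm (e :: q) := by
  induction q with
  | nil => simp [pvInsSorted]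
  | cons x t ih =>
    simp only [pvInsSorted]
    split
    · exact (ih.cons x).trans (List.Perm.swap e x t)
    · exact List.Perm.refl _

theorem pvInsSorted_pairwise (q : List (Int × Int)) (e : Int × Int)
    (hs : q.Pairwise pvLex) (hne : ∀ x ∈ q, x.2 ≠ e.2) :
    (pvInsSorted q e).Pairwise pvLex := by
  induction q with
  | nil => simp [pvInsSorted]
  | cons x t ih =>
    rw [List.pairwise_cons] at hs
    obtain ⟨hx, ht⟩ := hs
    simp only [pvInsSorted]
    split
    · rename_i hlt
      rw [List.pairwise_cons]
      refine ⟨?_, ih ht (fun y hy => hne y (List.mem_cons_of_mem _ hy))⟩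
      intro y hy
      have := (pvInsSorted_perm t e).mem_iff.mp hy
      rcases List.mem_cons.mp this with rfl | hyt
      · exact (pvLtPair_iff x y).mp hlt
      · exact hx y hyt
    · rename_i hnlt
      have hex : pvLex e x := pvLex_total (Bool.of_not_eq_true hnlt)
        (fun h => hne x (List.mem_cons_self) h)
      rw [List.pairwise_cons]
      refine ⟨?_, List.pairwise_cons.mpr ⟨hx, ht⟩⟩
      intro y hy
      rcases List.mem_cons.mp hy with rfl | hyt
      · exact hex
      · exact pvLex_trans hex (hx y hyt)

theorem pvModify_eq (l : List Int) (j : Nat) (f : Int → Int) (h : j < l.length) :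
    l.modify j f = l.take j ++ f l[j] :: l.drop (j + 1) := by
  induction l generalizing j with
  | nil => simp at h
  | cons x t ih =>
    cases j with
    | zero => simp [List.modify]
    | succ j =>
      simp only [List.modify_succ_cons, List.take_succ_cons, List.drop_succ_cons,
        List.getElem_cons_succ, List.cons_append]
      congr 1
      exact ih j (by simpa using Nat.lt_of_succ_lt_succ h)

theorem head_is_min (sizes : List Int) (queue : List (Int × Int)) (m : Int)
    (hperm : queue.Perm (pvPairs sizes 0)) (hsort : queue.Pairwise pvLex)
    (hmin : PySem.List.min? sizes (fun x => x) = some m) :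
    ∃ (j : Nat) (tail : List (Int × Int)),
      PySem.List.index? sizes m = some j ∧ queue = (m, (j : Int)) :: tail := by
  have hmem : m ∈ sizes := PySem.List.min?_mem hmin
  have hidx : (PySem.List.index? sizes m).isSome := (PySem.List.index?_isSome_iff sizes m).mpr hmem
  obtain ⟨j, hj⟩ := Option.isSome_iff_exists.mp hidx
  obtain ⟨hjlen, hjm, hjfirst⟩ := PySem.List.getElem_of_index?_eq_some hj
  have hmj : ((m, (j : Int)) : Int × Int) ∈ pvPairs sizes 0 := by
    rw [mem_pvPairs]
    exact ⟨j, hjlen, by simp [hjm]⟩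
  have hmjq : ((m, (j : Int)) : Int × Int) ∈ queue := hperm.mem_iff.mpr hmj
  cases queue with
  | nil => simp at hmjq
  | cons h tail =>
    refine ⟨j, tail, hj, ?_⟩
    rcases List.mem_cons.mp hmjq with heq | htail
    · rw [heq]
    · -- (m,j) is in the tail; show h = (m,j) by antisymmetry
      rw [List.pairwise_cons] at hsort
      have h1 : pvLex h (m, (j : Int)) := hsort.1 _ htail
      -- h is an element of the pairs
      have hh : h ∈ pvPairs sizes 0 := hperm.mem_iff.mp List.mem_cons_self
      rw [mem_pvPairs] at hh
      obtain ⟨k, hk, rfl⟩ := hh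
      have hmk : m ≤ sizes[k] := PySem.List.min?_isMin hmin _ (List.getElem_mem hk)
      have h2 : pvLex (m, (j : Int)) (sizes[k], ((0 + k : Nat) : Int)) := by
        rcases lt_or_eq_of_le hmk with hlt | heq2
        · exact Or.inl hlt
        · right
          refine ⟨heq2, ?_⟩
          have : j ≤ k := by
            by_contra hc
            exact hjfirst k (by omega) (by omega)
          have hne : j ≠ k := by
            rintro rfl
            unfold pvLex at h1
            simp at h1
            omega
          simp
          omega
      exact absurd h2 (fun h2 => pvLex_asymm h1 h2)

theorem pvStep (sizes : List Int) (tail : List (Int × Int)) (m : Int) (j : Nat) (g : Int)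
    (hperm : ((m, (j : Int)) :: tail).Perm (pvPairs sizes 0))
    (hsort : ((m, (j : Int)) :: tail).Pairwise pvLex)
    (hj : PySem.List.index? sizes m = some j) :
    (pvInsSorted tail (m + g, (j : Int))).Perm (pvPairs (sizes.modify j (· + g)) 0) ∧
    (pvInsSorted tail (m + g, (j : Int))).Pairwise pvLex := by
  obtain ⟨hjlen, hjm, hjfirst⟩ := PySem.List.getElem_of_index?_eq_some hj
  have hdecomp : sizes = sizes.take j ++ m :: sizes.drop (j + 1) := by
    conv_lhs => rw [← List.take_append_drop j sizes]
    congr 1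
    rw [← List.getElem_cons_drop hjlen, hjm]
  have hlen_take : (sizes.take j).length = j := by
    simp [List.length_take]
    omega
  have hpairs : pvPairs sizes 0 =
      pvPairs (sizes.take j) 0 ++ (m, (j : Int)) :: pvPairs (sizes.drop (j + 1)) (j + 1) := by
    conv_lhs => rw [hdecomp]
    rw [pvPairs_append, pvPairs_cons, hlen_take]
    simp
  have hpairs' : pvPairs (sizes.modify j (· + g)) 0 =
      pvPairs (sizes.take j) 0 ++ (m + g, (j : Int)) :: pvPairs (sizes.drop (j + 1)) (j + 1) := by
    rw [pvModify_eq sizes j _ hjlen, hjm, pvPairs_append, pvPairs_cons, hlen_take]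
    simp
  -- tail ~ P1 ++ P2
  have htail : tail.Perm (pvPairs (sizes.take j) 0 ++ pvPairs (sizes.drop (j + 1)) (j + 1)) := by
    have h2 : (pvPairs sizes 0).Perm
        ((m, (j : Int)) :: (pvPairs (sizes.take j) 0 ++ pvPairs (sizes.drop (j + 1)) (j + 1))) := by
      rw [hpairs]
      exact List.perm_middle
    exact (hperm.trans h2).cons_inv
  -- indices of tail differ from j
  have hsnods : (((m, (j : Int)) :: tail).map (·.2)).Nodup := by
    have := (hperm.map (·.2)).nodup_iff.mpr (pvPairs_snd_nodup sizes 0)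
    exact this
  have hne : ∀ x ∈ tail, x.2 ≠ ((j : Int)) := by
    intro x hx hcx
    simp only [List.map_cons, List.nodup_cons] at hsnods
    exact hsnods.1 (List.mem_map.mpr ⟨x, hx, hcx⟩)
  constructor
  · rw [hpairs']
    exact (pvInsSorted_perm tail _).trans ((htail.cons _).trans List.perm_middle.symm)
  · exact pvInsSorted_pairwise tail _ (List.pairwise_cons.mp hsort).2 hne

theorem pvLoop (gs : List (List (String × Int)))
    (splits : List (List (String × Int))) (sizes : List Int) (queue : List (Int × Int))
    (hnil : sizes ≠ [])
    (hperm : queue.Perm (pvPairs sizes 0)) (hsort : queue.Pairwise pvLex) :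
    (gs.foldl (fun st kg =>
      match PySem.List.min? st.2 (fun x => x) with
      | none => st
      | some m =>
        match PySem.List.index? st.2 m with
        | none => st
        | some j => (st.1.modify j (· ++ kg), st.2.modify j (· + (kg.length : Int))))
      (splits, sizes)).1 =
    (gs.foldl (fun st group =>
      match PySem.List.pop? st.2 0 with
      | none => st
      | some (si, rest) =>
        (st.1.modify si.2.toNat (· ++ group),
         PySem.List.insert rest ((pvInsPos rest (si.1 + (group.length : Int), si.2) : Nat) : Int)
           (si.1 + (group.length : Int), si.2)))
      (splits, queue)).1 := by
  induction gs generalizing splits sizes queue with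
  | nil => rfl
  | cons g gs ih =>
    obtain ⟨m, hmin⟩ : ∃ m, PySem.List.min? sizes (fun x => x) = some m := by
      cases hm : PySem.List.min? sizes (fun x => x) with
      | none => exact absurd ((PySem.List.min?_eq_none_iff sizes _).mp hm) hnil
      | some m => exact ⟨m, rfl⟩
    obtain ⟨j, tail, hj, rfl⟩ := head_is_min sizes queue m hperm hsort hmin
    simp only [List.foldl_cons, hmin, hj, PySem.List.pop?_zero_cons, Int.toNat_natCast]
    rw [insert_eq_pvInsSorted tail (m + (g.length : Int), (j : Int))]
    obtain ⟨hperm', hsort'⟩ := pvStep sizes tail m j (g.length : Int) hperm hsort hj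
    have hnil' : sizes.modify j (· + (g.length : Int)) ≠ [] := by
      intro hc
      have hlen := congrArg List.length hc
      rw [List.length_modify] at hlen
      exact hnil (List.length_eq_zero_iff.mp hlen)
    exact ih _ _ _ hnil' hperm' hsort'

theorem pvInit (num_splits : Int) :
    ((PySem.List.pyRange 0 num_splits 1).map (fun i => ((0 : Int), i))) =
      pvPairs (PySem.List.pyRepeat [(0 : Int)] num_splits) 0 := by
  rw [PySem.List.pyRepeat_singleton]
  have h : ∀ (n s : Nat), pvPairs (List.replicate n (0 : Int)) s =
      (List.range n).map (fun k => ((0 : Int), ((s + k : Nat) : Int))) := by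
    intro n
    induction n with
    | zero => intro s; simp [pvPairs]
    | succ n ih =>
      intro s
      rw [List.replicate_succ, pvPairs_cons, ih, List.range_succ_eq_map]
      simp only [List.map_cons, List.map_map]
      refine congrArg₂ _ (by simp) ?_
      apply List.map_congr_left
      intro k _
      congr 1
      omega
  rw [h]
  rw [PySem.List.pyRange_one]
  simp [List.map_map]

theorem pvInitSorted (num_splits : Int) :
    ((PySem.List.pyRange 0 num_splits 1).map (fun i => ((0 : Int), i))).Pairwise pvLex := by
  rw [PySem.List.pyRange_one]
  rw [List.map_map]
  rw [List.pairwise_map]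
  refine List.Pairwise.imp ?_ (List.pairwise_lt_range)
  intro a b hab
  exact Or.inr ⟨rfl, by simpa using hab⟩


theorem pvMain (contents : List (String × Int)) (num_splits : Int) (h : 1 ≤ num_splits) :
    naive_split contents num_splits = naive_split_alt contents num_splits := by
  have hnil : PySem.List.pyRepeat [(0 : Int)] num_splits ≠ [] := by
    rw [PySem.List.pyRepeat_singleton]
    simp
    omega
  have hperm : ((PySem.List.pyRange 0 num_splits 1).map (fun i => ((0 : Int), i))).Perm
      (pvPairs (PySem.List.pyRepeat [(0 : Int)] num_splits) 0) := by
    rw [pvInit]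
  have hsort := pvInitSorted num_splits
  have key := pvLoop
      (((contents.foldl (fun d item => d.modify item.1 [] (· ++ [item]))
          (PySem.Dict.empty : PySem.Dict String (List (String × Int)))).items).map (·.2))
      ((PySem.List.pyRange 0 num_splits 1).map (fun _ => []))
      (PySem.List.pyRepeat [(0 : Int)] num_splits)
      ((PySem.List.pyRange 0 num_splits 1).map (fun i => ((0 : Int), i)))
      hnil hperm hsort
  rw [List.foldl_map] at key
  exact key

-- ===== VERDICT (by name: the statement is the Claim_ definition above) =====
theorem naive_split_spec : Claim_equal_naive_split := by
  intro contents num_splits _ hpre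
  unfold Spec_naive_split
  rcases hpre with rfl | hge
  · rfl
  · exact pvMain contents num_splits hge
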